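-- pv_equiv track=rewrite | github.com/Hulyamr13/hackerrank | Clique.py | solve
-- ===== SOURCE A (Python) =====
-- def solve1(n, k):
--     g1 = n % k
--     g2 = k - g1
--     sz1 = n // k + 1
--     sz2 = n // k
--     ret = g1 * sz1 * g2 * sz2 + g1 * (g1 - 1) * sz1 * sz1 // 2 + g2 * (g2 - 1) * sz2 * sz2 // 2
--     return ret
--
-- def solve(n, e):
--     low = 1
--     high = n + 1
--     while low + 1 < high:
--         mid = low + (high - low) // 2
--         k = solve1(n, mid)
--         if k < e:
--             low = mid
--         else:
--             high = mid
--     return high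
-- ===== SOURCE B (Python) =====
-- def solve1(n, k):
--     g1 = n % k
--     g2 = k - g1
--     sz1 = n // k + 1
--     sz2 = n // k
--     ret = g1 * sz1 * g2 * sz2 + g1 * (g1 - 1) * sz1 * sz1 // 2 + g2 * (g2 - 1) * sz2 * sz2 // 2
--     return ret
--
-- def solve(n, e):
--     for mid in range(2, n + 2):
--         if solve1(n, mid) >= e:
--             return mid
--     return n + 1
-- ===== Notes on version B (the rewrite author's own statement) =====
-- stated objective: simpler
-- what changed: Replaced the binary search over the answer with a direct linear scan that returns the first partition count mid in [2, n+1] with solve1(n, mid) >= e (falling through to n+1), relying on solve1's monotonicity in mid.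
import Mathlib
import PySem

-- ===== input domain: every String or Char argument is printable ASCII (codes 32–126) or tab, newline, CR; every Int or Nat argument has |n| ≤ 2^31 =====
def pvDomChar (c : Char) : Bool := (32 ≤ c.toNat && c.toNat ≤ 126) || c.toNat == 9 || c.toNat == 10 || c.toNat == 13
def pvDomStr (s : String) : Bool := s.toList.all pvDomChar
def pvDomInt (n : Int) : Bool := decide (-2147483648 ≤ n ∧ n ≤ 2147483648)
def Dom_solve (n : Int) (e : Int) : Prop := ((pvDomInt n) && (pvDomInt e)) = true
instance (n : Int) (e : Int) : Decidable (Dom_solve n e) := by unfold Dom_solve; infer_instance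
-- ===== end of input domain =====

-- B replaces A's binary search with a linear scan for the first qualifying partition count (simpler; not faster).

-- ===== PORT A =====
-- helper shared by both ports: Python's solve1(n, k)
def solve1 (n : Int) (k : Int) : Int :=
  let g1 := PySem.Int.mod n k
  let g2 := k - g1
  let sz1 := PySem.Int.floordiv n k + 1
  let sz2 := PySem.Int.floordiv n k
  g1 * sz1 * g2 * sz2 + PySem.Int.floordiv (g1 * (g1 - 1) * sz1 * sz1) 2
    + PySem.Int.floordiv (g2 * (g2 - 1) * sz2 * sz2) 2

-- the while-loop of A, state (low, high)
def solveLoop (n : Int) (e : Int) (low : Int) (high : Int) : Int :=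
  if low + 1 < high then
    let mid := low + PySem.Int.floordiv (high - low) 2
    if solve1 n mid < e then solveLoop n e mid high
    else solveLoop n e low mid
  else high
termination_by (high - low).toNat
decreasing_by
  all_goals
    simp only [PySem.Int.floordiv_eq_ediv_of_pos (by norm_num : (0:Int) < 2)]
    omega

def solve (n : Int) (e : Int) : Int := solveLoop n e 1 (n + 1)

-- ===== PORT B =====
-- B's 'for mid in range(2, n + 2)' with early return: range is lazy in Python, so the
-- loop is ported as a counted scan from 2 ((n + 2) - 2 iterations), never materialising the range
def solveScan (n : Int) (e : Int) (mid : Int) : Nat → Int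
  | 0 => n + 1
  | fuel + 1 => if e ≤ solve1 n mid then mid else solveScan n e (mid + 1) fuel

def solve_alt (n : Int) (e : Int) : Int := solveScan n e 2 (n + 2 - 2).toNat

-- ===== PRECONDITION & SPEC =====
def Spec_solve (n : Int) (e : Int) (out : Int) : Prop := out = solve_alt n e
instance (n : Int) (e : Int) (out : Int) : Decidable (Spec_solve n e out) := by unfold Spec_solve; infer_instance

-- ===== CLAIM (what is proved, stated in full; the proofs are below) =====
def Claim_equal_solve : Prop := ∀ (n : Int) (e : Int), Dom_solve n e → Spec_solve n e (solve n e)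

-- ===== LEMMAS AND PROOFS =====

-- closed form: 2·solve1 n k = n(n−1) − q·(n + r − k) with q = n//k, r = n%k
lemma solve1_closed (n k : Int) (_hk : 0 < k) :
    2 * solve1 n k
      = n * (n - 1) - (PySem.Int.floordiv n k) * (n + PySem.Int.mod n k - k) := by
  set q := PySem.Int.floordiv n k with hq
  set r := PySem.Int.mod n k with hr
  have hn : q * k + r = n := PySem.Int.floordiv_mul_add_mod n k
  obtain ⟨c1, hc1⟩ : ∃ c, r * (r - 1) = 2 * c := by
    rcases Int.even_mul_succ_self (r - 1) with ⟨c, hc⟩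
    exact ⟨c, by linarith [hc]⟩
  obtain ⟨c2, hc2⟩ : ∃ c, (k - r) * (k - r - 1) = 2 * c := by
    rcases Int.even_mul_succ_self (k - r - 1) with ⟨c, hc⟩
    exact ⟨c, by linarith [hc]⟩
  have e1 : PySem.Int.floordiv (r * (r - 1) * (q + 1) * (q + 1)) 2 = c1 * (q + 1) * (q + 1) := by
    rw [show r * (r - 1) * (q + 1) * (q + 1) = 2 * (c1 * (q + 1) * (q + 1)) by
          linear_combination ((q + 1) * (q + 1)) * hc1,
        PySem.Int.floordiv_eq_ediv_of_pos (by norm_num : (0:Int) < 2)]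
    exact Int.mul_ediv_cancel_left _ (by norm_num)
  have e2 : PySem.Int.floordiv ((k - r) * (k - r - 1) * q * q) 2 = c2 * q * q := by
    rw [show (k - r) * (k - r - 1) * q * q = 2 * (c2 * q * q) by
          linear_combination (q * q) * hc2,
        PySem.Int.floordiv_eq_ediv_of_pos (by norm_num : (0:Int) < 2)]
    exact Int.mul_ediv_cancel_left _ (by norm_num)
  show 2 * (r * (q + 1) * (k - r) * q
      + PySem.Int.floordiv (r * (r - 1) * (q + 1) * (q + 1)) 2
      + PySem.Int.floordiv ((k - r) * (k - r - 1) * q * q) 2)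
      = n * (n - 1) - q * (n + r - k)
  rw [e1, e2]
  linear_combination (n + q * k + r - 1 - q) * hn - ((q + 1) * (q + 1)) * hc1 - (q * q) * hc2

-- solve1 n is nondecreasing from k to k+1 (n ≥ 0, k ≥ 1)
lemma solve1_step (n k : Int) (hn : 0 ≤ n) (hk : 1 ≤ k) : solve1 n k ≤ solve1 n (k + 1) := by
  have hk0 : (0:Int) < k := by omega
  have hk1 : (0:Int) < k + 1 := by omega
  have c1 := solve1_closed n k hk0
  have c2 := solve1_closed n (k + 1) hk1
  set q := PySem.Int.floordiv n k with hqdef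
  set r := PySem.Int.mod n k with hrdef
  set q' := PySem.Int.floordiv n (k + 1) with hq'def
  set r' := PySem.Int.mod n (k + 1) with hr'def
  have h1 : q * k + r = n := PySem.Int.floordiv_mul_add_mod n k
  have h2 : q' * (k + 1) + r' = n := PySem.Int.floordiv_mul_add_mod n (k + 1)
  have hr0 : 0 ≤ r := PySem.Int.mod_nonneg n hk0
  have hrk : r < k := PySem.Int.mod_lt n hk0
  have hr'0 : 0 ≤ r' := PySem.Int.mod_nonneg n hk1
  have hr'k : r' < k + 1 := PySem.Int.mod_lt n hk1
  have hq'0 : 0 ≤ q' := by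
    by_contra h
    have hle : q' ≤ -1 := by omega
    have hmul : q' * (k + 1) ≤ (-1) * (k + 1) := mul_le_mul_of_nonneg_right hle (by omega)
    linarith
  have hd : q' ≤ q := by
    by_contra h
    have hkd : k * (q - q') = q' + r' - r := by linear_combination h1 - h2
    have hmul : k * (q - q') ≤ k * (-1) := mul_le_mul_of_nonneg_left (by omega) (by omega)
    linarith
  have hrr : r = n - q * k := by linarith
  have hrr' : r' = n - q' * (k + 1) := by linarith
  have key : 2 * solve1 n (k + 1) - 2 * solve1 n k
      = k * ((q - q') * (q - q' - 1)) + 2 * (q - q') * r + q' * (q' + 1) := by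
    rw [c1, c2, hrr, hrr']
    ring
  have hdd : 0 ≤ (q - q') * (q - q' - 1) := by
    rcases lt_or_ge (q - q') 1 with h | h
    · have h0 : q - q' = 0 := by omega
      rw [h0]; norm_num
    · exact mul_nonneg (by omega) (by omega)
  have t1 : 0 ≤ k * ((q - q') * (q - q' - 1)) := mul_nonneg (by omega) hdd
  have t2 : 0 ≤ 2 * (q - q') * r := mul_nonneg (mul_nonneg (by norm_num) (by omega)) hr0
  have t3 : 0 ≤ q' * (q' + 1) := mul_nonneg hq'0 (by omega)
  linarith

-- monotonicity of solve1 n on [1, ∞)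
lemma solve1_mono (n a b : Int) (hn : 0 ≤ n) (ha : 1 ≤ a) (hab : a ≤ b) :
    solve1 n a ≤ solve1 n b := by
  obtain ⟨m, hm⟩ : ∃ m : Nat, b = a + m := ⟨(b - a).toNat, by omega⟩
  subst hm
  induction m with
  | zero => simp
  | succ m ih =>
      have h1 : solve1 n a ≤ solve1 n (a + m) := ih (by omega)
      have h2 : solve1 n (a + m) ≤ solve1 n (a + m + 1) :=
        solve1_step n (a + m) hn (by omega)
      have hcast : ((m + 1 : Nat) : Int) = (m : Int) + 1 := by push_cast; ring
      rw [hcast, ← add_assoc]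
      linarith

-- the scan stops at the first qualifying value
lemma scan_found (n e : Int) :
    ∀ (fuel : Nat) (mid x : Int), mid ≤ x → (x - mid).toNat < fuel →
      (∀ m, mid ≤ m → m < x → solve1 n m < e) → e ≤ solve1 n x →
      solveScan n e mid fuel = x := by
  intro fuel
  induction fuel with
  | zero => intro mid x _ hf _ _; omega
  | succ fuel ih =>
      intro mid x hmx hf hbelow hx
      rw [solveScan]
      by_cases hm : e ≤ solve1 n mid
      · rw [if_pos hm]
        by_contra hne
        exact absurd hm (not_le.mpr (hbelow mid (le_refl mid) (by omega)))
      · rw [if_neg hm]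
        have hmlt : mid < x := by
          rcases eq_or_lt_of_le hmx with h | h
          · exact absurd hx (by rw [← h]; exact hm)
          · exact h
        exact ih (mid + 1) x (by omega) (by omega)
          (fun m hm1 hm2 => hbelow m (by omega) hm2) hx

-- the scan falls through when nothing qualifies
lemma scan_none (n e : Int) :
    ∀ (fuel : Nat) (mid : Int), (∀ m, mid ≤ m → m < mid + fuel → solve1 n m < e) →
      solveScan n e mid fuel = n + 1 := by
  intro fuel
  induction fuel with
  | zero => intro mid _; rfl
  | succ fuel ih =>
      intro mid h
      rw [solveScan]
      rw [if_neg (not_le.mpr (h mid (le_refl mid) (by omega)))]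
      exact ih (mid + 1) (fun m hm1 hm2 => h m (by omega) (by push_cast at hm2 ⊢; omega))

-- the binary search, under its loop invariant, computes B's linear-scan answer
lemma loop_eq (n e : Int) (hn : 2 ≤ n) :
    ∀ (t : Nat) (low high : Int), (high - low).toNat = t →
      1 ≤ low → low < high → high ≤ n + 1 →
      (∀ m, 2 ≤ m → m ≤ low → solve1 n m < e) →
      (high ≤ n → e ≤ solve1 n high) →
      solveLoop n e low high = solve_alt n e := by
  intro t
  induction t using Nat.strong_induction_on with
  | _ t ih =>
    intro low high ht h1 h2 h3 h4 h5
    conv_lhs => rw [solveLoop]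
    split
    · next hcond =>
      show (if solve1 n (low + PySem.Int.floordiv (high - low) 2) < e then
              solveLoop n e (low + PySem.Int.floordiv (high - low) 2) high
            else solveLoop n e low (low + PySem.Int.floordiv (high - low) 2)) = solve_alt n e
      have hfd : PySem.Int.floordiv (high - low) 2 = (high - low) / 2 :=
        PySem.Int.floordiv_eq_ediv_of_pos (by norm_num)
      have hmid1 : low < low + PySem.Int.floordiv (high - low) 2 := by rw [hfd]; omega
      have hmid2 : low + PySem.Int.floordiv (high - low) 2 < high := by rw [hfd]; omega
      set mid := low + PySem.Int.floordiv (high - low) 2 with hmiddef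
      split
      · next hbr =>
        exact ih (high - mid).toNat (by omega) mid high rfl (by omega) hmid2 h3
          (fun m hm2 hmmid =>
            lt_of_le_of_lt (solve1_mono n m mid (by omega) (by omega) hmmid) hbr)
          h5
      · next hbr =>
        exact ih (mid - low).toNat (by omega) low mid rfl h1 hmid1 (by omega) h4
          (fun _ => by omega)
    · next hcond =>
      have hhl : high = low + 1 := by omega
      unfold solve_alt
      by_cases hh : high ≤ n
      · exact (scan_found n e (n + 2 - 2).toNat 2 high (by omega) (by omega)
          (fun m hm2 hmx => h4 m hm2 (by omega)) (h5 hh)).symm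
      · have hh1 : high = n + 1 := by omega
        by_cases hp : e ≤ solve1 n (n + 1)
        · rw [scan_found n e (n + 2 - 2).toNat 2 (n + 1) (by omega) (by omega)
            (fun m hm2 hmx => h4 m hm2 (by omega)) hp]
          omega
        · rw [scan_none n e (n + 2 - 2).toNat 2
            (fun m hm2 hmx => by
              rcases lt_or_ge n m with hmn | hmn
              · have hm1 : m = n + 1 := by omega
                rw [hm1]; omega
              · exact h4 m hm2 (by omega))]
          omega

-- ===== VERDICT (by name: the statement is the Claim_ definition above) =====
theorem solve_spec : Claim_equal_solve := by
  intro n e _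
  show solve n e = solve_alt n e
  unfold solve
  rcases lt_or_ge (1 : Int) n with hn | hn
  · exact loop_eq n e (by omega) (n + 1 - 1).toNat 1 (n + 1) rfl (le_refl 1) (by omega)
      (le_refl _) (fun m hm2 hm1 => by omega) (fun h => by omega)
  · conv_lhs => rw [solveLoop]
    rw [if_neg (by omega)]
    unfold solve_alt
    rcases lt_or_ge n 1 with hn0 | hn0
    · rw [show (n + 2 - 2 : Int) = n by ring, Int.toNat_of_nonpos (by omega)]
      rfl
    · have h1 : n = 1 := by omega
      subst h1
      show (1 : Int) + 1 = solveScan 1 e 2 1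
      rw [solveScan]
      split <;> rfl
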